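-- pv_equiv track=rewrite | github.com/openvinotoolkit/openvino | tests/layer_tests/pytorch_tests/test_norm.py | _compute_out_shape
-- ===== SOURCE A (Python) =====
-- def _compute_out_shape(input_shape, dim, keepdim):
--     """Return the output shape for a norm reduction given dim and keepdim."""
--     ndim = len(input_shape)
--     if dim is None:
--         return tuple(1 for _ in input_shape) if keepdim else ()
--     dims = {dim % ndim} if isinstance(dim, int) else {d % ndim for d in dim}
--     return tuple(
--         (1 if i in dims else s) if keepdim else s
--         for i, s in enumerate(input_shape)
--         if keepdim or i not in dims
--     )
-- ===== SOURCE B (Python) =====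
-- def _compute_out_shape(input_shape, dim, keepdim):
--     """Return the output shape for a norm reduction given dim and keepdim."""
--     ndim = len(input_shape)
--     if dim is None:
--         return tuple(1 for _ in input_shape) if keepdim else ()
--     dims = {dim % ndim} if isinstance(dim, int) else {d % ndim for d in dim}
--     result = list(input_shape)
--     if keepdim:
--         for d in dims:
--             result[d] = 1
--     else:
--         for d in sorted(dims, reverse=True):
--             del result[d]
--     return tuple(result)
-- ===== Notes on version B (the rewrite author's own statement) =====
-- stated objective: alternative
-- what changed: B keeps A's dim normalization but replaces A's single scan over all dimensions with membership tests by in-place mutation of a copy: it loops only over the reduced dims, setting result[d]=1 for keepdim or deleting indices in descending order otherwise.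
import Mathlib
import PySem

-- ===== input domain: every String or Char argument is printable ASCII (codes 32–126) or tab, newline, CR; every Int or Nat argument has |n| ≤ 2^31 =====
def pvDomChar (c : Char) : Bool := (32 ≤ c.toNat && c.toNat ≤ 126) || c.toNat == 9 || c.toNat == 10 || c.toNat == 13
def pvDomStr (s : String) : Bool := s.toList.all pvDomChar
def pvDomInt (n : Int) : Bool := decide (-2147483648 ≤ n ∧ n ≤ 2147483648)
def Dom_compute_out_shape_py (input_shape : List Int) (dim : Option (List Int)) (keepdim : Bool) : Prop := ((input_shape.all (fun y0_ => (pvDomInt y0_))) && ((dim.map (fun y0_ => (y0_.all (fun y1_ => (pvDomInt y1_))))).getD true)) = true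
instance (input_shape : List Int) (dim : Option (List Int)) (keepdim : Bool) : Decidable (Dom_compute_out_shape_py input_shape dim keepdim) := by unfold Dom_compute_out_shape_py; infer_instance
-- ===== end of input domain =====

-- B keeps A's dims-normalization but builds the result by mutating a copy along the reduced dims
-- (set to 1, or delete in descending index order) instead of scanning every dimension with a membership test.

-- ===== PORT A =====
def compute_out_shape_py (input_shape : List Int) (dim : Option (List Int)) (keepdim : Bool) : List Int :=
  let ndim : Int := (input_shape.length : Int)
  match dim with
  | none => if keepdim then input_shape.map (fun _ => 1) else []
  | some ds =>
      let dims : PySem.Set Int := PySem.Set.ofList (ds.map (fun d => PySem.Int.mod d ndim))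
      ((PySem.List.enumerate input_shape 0).filter
          (fun p => keepdim || !(PySem.Set.contains dims p.1))).map
        (fun p => if keepdim then (if PySem.Set.contains dims p.1 then 1 else p.2) else p.2)

-- ===== PORT B =====
-- pySetD / pop? are the total forms of result[d] = 1 / del result[d]; under Pre_ every index d
-- satisfies 0 ≤ d < len(result) (d = e % ndim with ndim > 0, and deletions proceed from the largest
-- index down), where Python's result[d] = 1 and del result[d] succeed, so they are exact there.
def compute_out_shape_py_alt (input_shape : List Int) (dim : Option (List Int)) (keepdim : Bool) : List Int :=
  let ndim : Int := (input_shape.length : Int)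
  match dim with
  | none => if keepdim then input_shape.map (fun _ => 1) else []
  | some ds =>
      let dims : PySem.Set Int := PySem.Set.ofList (ds.map (fun d => PySem.Int.mod d ndim))
      if keepdim then
        dims.foldl (fun r d => PySem.List.pySetD r d 1) input_shape
      else
        (PySem.List.sorted dims (fun x => x) true).foldl
          (fun r d =>
            match PySem.List.pop? r d with  -- del result[d]
            | some (_, rest) => rest
            | none => r)
          input_shape

-- ===== PRECONDITION & SPEC =====
-- Pre_ excludes only inputs on which A raises: a non-empty dim list with an empty shape makes
-- 'd % ndim' divide by zero (ZeroDivisionError) — in A and in B alike.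
def Pre_compute_out_shape_py (input_shape : List Int) (dim : Option (List Int)) (keepdim : Bool) : Prop :=
  dim.getD [] ≠ [] → input_shape ≠ []
instance (input_shape : List Int) (dim : Option (List Int)) (keepdim : Bool) : Decidable (Pre_compute_out_shape_py input_shape dim keepdim) := by unfold Pre_compute_out_shape_py; infer_instance

def pvWitness_compute_out_shape_py : List Int × Option (List Int) × Bool := ([2, 3, 4], some [0, -1], true)

def Spec_compute_out_shape_py (input_shape : List Int) (dim : Option (List Int)) (keepdim : Bool) (out : List Int) : Prop := out = compute_out_shape_py_alt input_shape dim keepdim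
instance (input_shape : List Int) (dim : Option (List Int)) (keepdim : Bool) (out : List Int) : Decidable (Spec_compute_out_shape_py input_shape dim keepdim out) := by unfold Spec_compute_out_shape_py; infer_instance

-- ===== CLAIM (what is proved, stated in full; the proofs are below) =====
def Claim_equal_compute_out_shape_py : Prop := ∀ (input_shape : List Int) (dim : Option (List Int)) (keepdim : Bool), Dom_compute_out_shape_py input_shape dim keepdim → Pre_compute_out_shape_py input_shape dim keepdim → Spec_compute_out_shape_py input_shape dim keepdim (compute_out_shape_py input_shape dim keepdim)

-- ===== LEMMAS AND PROOFS =====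

-- keepdim: setting each index of D to 1 equals A's membership-test scan
theorem pv_foldl_set_eq_map (D : List Int) : ∀ (r : List Int), (∀ e ∈ D, 0 ≤ e ∧ e < (r.length : Int)) →
    D.foldl (fun r d => PySem.List.pySetD r d 1) r
      = (PySem.List.enumerate r 0).map (fun p => if p.1 ∈ D then (1 : Int) else p.2) := by
  induction D with
  | nil =>
      intro r _
      simp [PySem.List.map_snd_enumerate]
  | cons d D ih =>
      intro r h
      have hd := h d (by simp)
      rw [List.foldl_cons, PySem.List.pySetD_of_nonneg r 1 hd.1,
        ih _ (by intro e he; have := h e (by simp [he]); simpa using this)]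
      apply List.ext_getElem
      · simp [PySem.List.length_enumerate]
      · intro k h1 h2
        simp only [List.getElem_map, PySem.List.getElem_enumerate, List.getElem_set,
          List.mem_cons, zero_add]
        have hk : k < r.length := by simpa [PySem.List.length_enumerate] using h2
        by_cases hm : (k : Int) ∈ D
        · simp [hm]
        · by_cases he : d.toNat = k
          · have : (k : Int) = d := by omega
            simp [hm, he, this]
          · have : ¬ (k : Int) = d := by omega
            simp [he, this]

-- non-keepdim: deleting a strictly descending list of indices equals A's filter scan
theorem pv_foldl_del_eq_filter (S : List Int) : ∀ (r : List Int), S.Pairwise (· > ·) →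
    (∀ e ∈ S, 0 ≤ e ∧ e < (r.length : Int)) →
    S.foldl (fun r d => match PySem.List.pop? r d with | some (_, rest) => rest | none => r) r
      = ((PySem.List.enumerate r 0).filter (fun p => !(decide (p.1 ∈ S)))).map (·.2) := by
  induction S with
  | nil => intro r _ _; simp [PySem.List.map_snd_enumerate]
  | cons d S ih =>
      intro r hp hb
      have hd := hb d (by simp)
      have hj : d.toNat < r.length := by omega
      have hgt : ∀ e ∈ S, e < d := fun e he => (List.pairwise_cons.mp hp).1 e he
      have hpop : PySem.List.pop? r d = some (r[d.toNat], r.eraseIdx d.toNat) := by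
        have h0 := PySem.List.pop?_natCast r d.toNat hj
        rwa [Int.toNat_of_nonneg hd.1] at h0
      have hlen : (r.eraseIdx d.toNat).length = r.length - 1 := List.length_eraseIdx_of_lt hj
      rw [List.foldl_cons]
      simp only [hpop]
      rw [ih _ (List.pairwise_cons.mp hp).2 (by
        intro e he
        have h1 := hb e (by simp [he])
        have h2 := hgt e he
        constructor
        · exact h1.1
        · rw [hlen]; omega)]
      -- decompose r around index d.toNat
      have hr : r = r.take d.toNat ++ r[d.toNat] :: r.drop (d.toNat + 1) := by
        conv_lhs => rw [← List.take_append_drop d.toNat r]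
        rw [List.getElem_cons_drop hj]
      have herase : r.eraseIdx d.toNat = r.take d.toNat ++ r.drop (d.toNat + 1) :=
        List.eraseIdx_eq_take_drop_succ r d.toNat
      have ht : (r.take d.toNat).length = d.toNat := by simp [List.length_take]; omega
      rw [herase]
      conv_rhs => rw [hr]
      rw [PySem.List.enumerate_append, PySem.List.enumerate_append, PySem.List.enumerate_cons,
        ht]
      rw [List.filter_append, List.filter_append, List.map_append, List.map_append]
      congr 1
      · -- take part: membership in d::S agrees with membership in S since indices < d
        have : List.filter (fun p => !(decide (p.1 ∈ d :: S))) (PySem.List.enumerate (r.take d.toNat) 0)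
            = List.filter (fun p => !(decide (p.1 ∈ S))) (PySem.List.enumerate (r.take d.toNat) 0) := by
          apply List.filter_congr
          intro p hpmem
          rcases (PySem.List.mem_enumerate_iff _ _ _).mp hpmem with ⟨k, hk, rfl⟩
          have hkd : (0 + (k : Int)) ≠ d := by rw [ht] at hk; omega
          simp [List.mem_cons]
          intro _
          omega
        rw [this]
      · -- drop part: indices ≥ d (resp. > d) are in neither set; the (d, r[d]) pair is dropped
        have h1 : List.filter (fun p => !(decide (p.1 ∈ S))) (PySem.List.enumerate (r.drop (d.toNat + 1)) (0 + ↑d.toNat))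
            = PySem.List.enumerate (r.drop (d.toNat + 1)) (0 + ↑d.toNat) := by
          apply List.filter_eq_self.mpr
          intro p hpmem
          rcases (PySem.List.mem_enumerate_iff _ _ _).mp hpmem with ⟨k, hk, rfl⟩
          simp only [Bool.not_eq_eq_eq_not, Bool.not_true, decide_eq_false_iff_not]
          intro hmem
          have := hgt _ hmem
          omega
        have h2 : List.filter (fun p => !(decide (p.1 ∈ d :: S))) (PySem.List.enumerate (r.drop (d.toNat + 1)) (0 + ↑d.toNat + 1))
            = PySem.List.enumerate (r.drop (d.toNat + 1)) (0 + ↑d.toNat + 1) := by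
          apply List.filter_eq_self.mpr
          intro p hpmem
          rcases (PySem.List.mem_enumerate_iff _ _ _).mp hpmem with ⟨k, hk, rfl⟩
          simp only [Bool.not_eq_eq_eq_not, Bool.not_true, decide_eq_false_iff_not, List.mem_cons]
          rintro (heq | hmem)
          · omega
          · have := hgt _ hmem; omega
        have hdd : (decide ((0 + (d.toNat : Int)) ∈ d :: S)) = true := by
          simp [List.mem_cons]; left; omega
        rw [h1]
        rw [List.filter_cons]
        simp only [hdd]
        rw [h2]
        simp [PySem.List.map_snd_enumerate]

-- main equality, on Pre_
theorem pv_main (input_shape : List Int) (dim : Option (List Int)) (keepdim : Bool)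
    (hpre : dim.getD [] ≠ [] → input_shape ≠ []) :
    compute_out_shape_py input_shape dim keepdim = compute_out_shape_py_alt input_shape dim keepdim := by
  unfold compute_out_shape_py compute_out_shape_py_alt
  cases dim with
  | none => rfl
  | some ds =>
      simp only [Option.getD_some] at hpre
      by_cases hnil : input_shape = []
      · subst hnil
        have hds : ds = [] := by
          by_contra h
          exact (hpre h) rfl
        subst hds
        cases keepdim <;> rfl
      · have hn : 0 < (input_shape.length : Int) := by
          have := List.length_pos_iff.mpr hnil
          omega
        have hbound : ∀ e ∈ PySem.Set.ofList (ds.map (fun d => PySem.Int.mod d (input_shape.length : Int))),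
            0 ≤ e ∧ e < (input_shape.length : Int) := by
          intro e he
          rw [PySem.Set.mem_ofList] at he
          rcases List.mem_map.mp he with ⟨d, _, rfl⟩
          exact ⟨PySem.Int.mod_nonneg d hn, PySem.Int.mod_lt d hn⟩
        cases keepdim with
        | true =>
            dsimp only
            simp only [Bool.true_or, List.filter_true, if_true]
            rw [pv_foldl_set_eq_map _ input_shape hbound]
            apply List.map_congr_left
            intro p _
            by_cases hm : p.1 ∈ PySem.Set.ofList (ds.map (fun d => PySem.Int.mod d (input_shape.length : Int)))
            · simp [hm, PySem.Set.contains]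
            · simp [hm, PySem.Set.contains]
        | false =>
            dsimp only
            have hperm := PySem.List.sorted_perm (PySem.Set.ofList (ds.map (fun d => PySem.Int.mod d (input_shape.length : Int)))) (fun x => x) true
            have hnodup : (PySem.List.sorted (PySem.Set.ofList (ds.map (fun d => PySem.Int.mod d (input_shape.length : Int)))) (fun x => x) true).Nodup :=
              hperm.nodup_iff.mpr (PySem.Set.nodup_ofList _)
            have hPair : (PySem.List.sorted (PySem.Set.ofList (ds.map (fun d => PySem.Int.mod d (input_shape.length : Int)))) (fun x => x) true).Pairwise (· > ·) := by
              have h1 := PySem.List.sorted_pairwise_rev (PySem.Set.ofList (ds.map (fun d => PySem.Int.mod d (input_shape.length : Int)))) (fun x => x)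
              exact (h1.and hnodup).imp (fun h => by
                rcases h with ⟨hle, hne⟩
                omega)
            rw [pv_foldl_del_eq_filter _ input_shape hPair (by
              intro e he
              exact hbound e ((PySem.List.mem_sorted _ _ _ _).mp he))]
            simp only [Bool.false_or]
            congr 1
            apply List.filter_congr
            intro p _
            by_cases hm : p.1 ∈ PySem.Set.ofList (ds.map (fun d => PySem.Int.mod d (input_shape.length : Int)))
            · simp [hm, PySem.Set.contains, PySem.List.mem_sorted]
            · simp [hm, PySem.Set.contains, PySem.List.mem_sorted]

-- ===== VERDICT (by name: the statement is the Claim_ definition above) =====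
theorem compute_out_shape_py_spec : Claim_equal_compute_out_shape_py := by
  intro input_shape dim keepdim _ hpre
  exact pv_main input_shape dim keepdim hpre
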